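-- pv_equiv track=rewrite | github.com/brianjwalters/graphrag-service | src/core/relationship_discoverer.py | _determine_link_type
-- ===== SOURCE A (Python) =====
-- from typing import List, Dict, Any, Tuple, Optional, Set
--
-- def _determine_link_type(
--                         shared_entities: Set[str],
--                         all_entities: List[Dict[str, Any]],
--                         all_relationships: List[Dict[str, Any]]) -> str:
--     """Determine the type of cross-document link."""
--     # Get entity types for shared entities
--     entity_types = []
--     for entity in all_entities:
--         if entity["entity_id"] in shared_entities:
--             entity_types.append(entity.get("entity_type", ""))
--
--     # Determine link type based on entity types
--     if "CASE" in entity_types or "CITATION" in entity_types: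
--         return "CITATION_LINK"
--     elif "PARTY" in entity_types:
--         return "SHARED_PARTY"
--     elif "COURT" in entity_types or "JUDGE" in entity_types:
--         return "SAME_JURISDICTION"
--     elif "CONTRACT" in entity_types:
--         return "RELATED_CONTRACT"
--     else:
--         return "GENERAL_REFERENCE"
-- ===== SOURCE B (Python) =====
-- _RANK = {"CASE": 0, "CITATION": 0, "PARTY": 1, "COURT": 2, "JUDGE": 2, "CONTRACT": 3}
-- _LABELS = ("CITATION_LINK", "SHARED_PARTY", "SAME_JURISDICTION",
--            "RELATED_CONTRACT", "GENERAL_REFERENCE")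
--
--
-- def _determine_link_type(shared_entities, all_entities, all_relationships):
--     """Determine the type of cross-document link (single min-rank pass)."""
--     best = 4
--     for entity in all_entities:
--         if entity["entity_id"] in shared_entities:
--             best = min(best, _RANK.get(entity.get("entity_type", ""), 4))
--     return _LABELS[best]
-- ===== Notes on version B (the rewrite author's own statement) =====
-- stated objective: alternative
-- what changed: Replaces the collect-all-types list plus five membership scans with a single pass keeping a running minimum priority rank (via a rank dict) and indexing a label table by the final minimum.
import Mathlib
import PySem

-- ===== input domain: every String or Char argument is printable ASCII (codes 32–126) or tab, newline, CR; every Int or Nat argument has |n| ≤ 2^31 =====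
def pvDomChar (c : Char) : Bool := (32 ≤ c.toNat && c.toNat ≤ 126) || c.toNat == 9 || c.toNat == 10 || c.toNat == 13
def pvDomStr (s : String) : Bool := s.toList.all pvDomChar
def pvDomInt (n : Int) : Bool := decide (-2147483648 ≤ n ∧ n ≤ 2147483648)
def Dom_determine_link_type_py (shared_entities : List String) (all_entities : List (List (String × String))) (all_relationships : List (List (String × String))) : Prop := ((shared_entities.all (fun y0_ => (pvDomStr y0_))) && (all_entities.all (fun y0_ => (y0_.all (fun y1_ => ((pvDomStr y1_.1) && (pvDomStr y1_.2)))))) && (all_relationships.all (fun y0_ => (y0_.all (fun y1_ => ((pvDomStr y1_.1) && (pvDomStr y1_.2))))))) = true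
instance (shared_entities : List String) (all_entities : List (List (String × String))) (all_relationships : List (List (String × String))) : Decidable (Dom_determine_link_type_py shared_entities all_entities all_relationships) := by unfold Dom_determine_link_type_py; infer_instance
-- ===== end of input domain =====

-- B replaces A's collect-all-entity-types list and five-way membership chain by a single pass keeping the minimum priority rank, then indexes a label table (alternative decomposition, same cost).
-- ===== PORT A =====
-- Port of A. A writes entity["entity_id"], which raises KeyError on a missing key;
-- Pre_ below excludes exactly those inputs, so getD "" is exact on the admitted domain.
def determine_link_type_py (shared_entities : List String) (all_entities : List (List (String × String))) (all_relationships : List (List (String × String))) : String :=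
  let entity_types : List String := all_entities.foldl (fun acc e =>
    if shared_entities.contains ((PySem.Dict.mk e).getD "entity_id" "") then
      acc ++ [(PySem.Dict.mk e).getD "entity_type" ""]
    else acc) []
  if entity_types.contains "CASE" || entity_types.contains "CITATION" then "CITATION_LINK"
  else if entity_types.contains "PARTY" then "SHARED_PARTY"
  else if entity_types.contains "COURT" || entity_types.contains "JUDGE" then "SAME_JURISDICTION"
  else if entity_types.contains "CONTRACT" then "RELATED_CONTRACT"
  else "GENERAL_REFERENCE"

-- ===== PORT B =====
-- B: one pass tracking the minimum priority rank, then index a label table.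
def pvRanks : PySem.Dict String Nat :=
  PySem.Dict.mk [("CASE", 0), ("CITATION", 0), ("PARTY", 1), ("COURT", 2), ("JUDGE", 2), ("CONTRACT", 3)]

def pvLabels : List String :=
  ["CITATION_LINK", "SHARED_PARTY", "SAME_JURISDICTION", "RELATED_CONTRACT", "GENERAL_REFERENCE"]

-- B also writes entity["entity_id"] (KeyError on a missing key, excluded by Pre_ below, so getD "" is exact).
def determine_link_type_py_alt (shared_entities : List String) (all_entities : List (List (String × String))) (all_relationships : List (List (String × String))) : String :=
  let best : Nat := all_entities.foldl (fun best e =>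
    if shared_entities.contains ((PySem.Dict.mk e).getD "entity_id" "") then
      min best (pvRanks.getD ((PySem.Dict.mk e).getD "entity_type" "") 4)
    else best) 4
  pvLabels.getD best ""   -- best ≤ 4 always, so the default is never used (LABELS[best])

-- ===== PRECONDITION & SPEC =====
-- Pre_ excludes exactly the inputs on which A (and B) raises KeyError: an entity dict without an "entity_id" key.
def Pre_determine_link_type_py (shared_entities : List String) (all_entities : List (List (String × String))) (all_relationships : List (List (String × String))) : Prop :=
  ∀ e ∈ all_entities, ((PySem.Dict.mk e).get? "entity_id").isSome
instance (shared_entities : List String) (all_entities : List (List (String × String))) (all_relationships : List (List (String × String))) : Decidable (Pre_determine_link_type_py shared_entities all_entities all_relationships) := by unfold Pre_determine_link_type_py; infer_instance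

def pvWitness_determine_link_type_py : List String × (List (List (String × String))) × (List (List (String × String))) :=
  (["e1"], [[("entity_id", "e1"), ("entity_type", "PARTY")], [("entity_id", "e2"), ("entity_type", "CASE")]], [])

def Spec_determine_link_type_py (shared_entities : List String) (all_entities : List (List (String × String))) (all_relationships : List (List (String × String))) (out : String) : Prop := out = determine_link_type_py_alt shared_entities all_entities all_relationships
instance (shared_entities : List String) (all_entities : List (List (String × String))) (all_relationships : List (List (String × String))) (out : String) : Decidable (Spec_determine_link_type_py shared_entities all_entities all_relationships out) := by unfold Spec_determine_link_type_py; infer_instance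

-- ===== CLAIM (what is proved, stated in full; the proofs are below) =====
def Claim_equal_determine_link_type_py : Prop := ∀ (shared_entities : List String) (all_entities : List (List (String × String))) (all_relationships : List (List (String × String))), Dom_determine_link_type_py shared_entities all_entities all_relationships → Pre_determine_link_type_py shared_entities all_entities all_relationships → Spec_determine_link_type_py shared_entities all_entities all_relationships (determine_link_type_py shared_entities all_entities all_relationships)

-- ===== LEMMAS AND PROOFS =====

-- the priority rank B looks up
def pvRank (t : String) : Nat := pvRanks.getD t 4

lemma pvRank_eq (t : String) : pvRank t =
    if t = "CASE" then 0 else if t = "CITATION" then 0 else if t = "PARTY" then 1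
    else if t = "COURT" then 2 else if t = "JUDGE" then 2 else if t = "CONTRACT" then 3 else 4 := by
  by_cases h1 : t = "CASE"
  · subst h1; decide
  by_cases h2 : t = "CITATION"
  · subst h2; decide
  by_cases h3 : t = "PARTY"
  · subst h3; decide
  by_cases h4 : t = "COURT"
  · subst h4; decide
  by_cases h5 : t = "JUDGE"
  · subst h5; decide
  by_cases h6 : t = "CONTRACT"
  · subst h6; decide
  simp [pvRank, pvRanks, PySem.Dict.getD, PySem.Dict.get?,
    Ne.symm h1, Ne.symm h2, Ne.symm h3, Ne.symm h4, Ne.symm h5, Ne.symm h6,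
    h1, h2, h3, h4, h5, h6]

-- the running minimum of the ranks, recursively
def pvMinRank : List String → Nat
  | [] => 4
  | t :: ts => min (pvRank t) (pvMinRank ts)

lemma pvMinRank_le_four (ts : List String) : pvMinRank ts ≤ 4 := by
  induction ts with
  | nil => simp [pvMinRank]
  | cons t ts ih => simp only [pvMinRank]; omega

lemma pvMinRank_le_of_mem {t : String} {ts : List String} (h : t ∈ ts) : pvMinRank ts ≤ pvRank t := by
  induction ts with
  | nil => cases h
  | cons u ts ih =>
    rcases List.mem_cons.mp h with h | h
    · subst h; simp [pvMinRank]
    · have := ih h; simp only [pvMinRank]; omega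

lemma pvMinRank_attained (ts : List String) : pvMinRank ts = 4 ∨ ∃ t ∈ ts, pvRank t = pvMinRank ts := by
  induction ts with
  | nil => left; rfl
  | cons u ts ih =>
    by_cases h : pvRank u ≤ pvMinRank ts
    · right; exact ⟨u, List.mem_cons_self, by simp only [pvMinRank]; omega⟩
    · rcases ih with h4 | ⟨t, ht, hr⟩
      · left; have := pvMinRank_le_four ts; simp only [pvMinRank]; omega
      · right; exact ⟨t, List.mem_cons_of_mem _ ht, by simp only [pvMinRank]; omega⟩

lemma pvFoldl_min (ts : List String) (m : Nat) (hm : m ≤ 4) :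
    ts.foldl (fun b t => min b (pvRank t)) m = min m (pvMinRank ts) := by
  induction ts generalizing m with
  | nil => simp [pvMinRank]; omega
  | cons t ts ih =>
    simp only [List.foldl_cons, pvMinRank]
    rw [ih (min m (pvRank t)) (by omega)]
    omega

lemma pvNotMem {ts : List String} {t : String} (h : pvRank t < pvMinRank ts) : t ∉ ts :=
  fun hm => absurd (pvMinRank_le_of_mem hm) (by omega)

-- the membership chain of A equals indexing the label table by the minimum rank
lemma pvClassify_eq (ts : List String) :
    (if ts.contains "CASE" || ts.contains "CITATION" then "CITATION_LINK"
     else if ts.contains "PARTY" then "SHARED_PARTY"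
     else if ts.contains "COURT" || ts.contains "JUDGE" then "SAME_JURISDICTION"
     else if ts.contains "CONTRACT" then "RELATED_CONTRACT"
     else "GENERAL_REFERENCE") = pvLabels.getD (pvMinRank ts) "" := by
  have h4 := pvMinRank_le_four ts
  rcases pvMinRank_attained ts with hA | ⟨t, htm, htr⟩
  · have c0 : "CASE" ∉ ts := pvNotMem (by rw [hA]; simp [pvRank_eq])
    have c1 : "CITATION" ∉ ts := pvNotMem (by rw [hA]; simp [pvRank_eq])
    have c2 : "PARTY" ∉ ts := pvNotMem (by rw [hA]; simp [pvRank_eq])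
    have c3 : "COURT" ∉ ts := pvNotMem (by rw [hA]; simp [pvRank_eq])
    have c4 : "JUDGE" ∉ ts := pvNotMem (by rw [hA]; simp [pvRank_eq])
    have c5 : "CONTRACT" ∉ ts := pvNotMem (by rw [hA]; simp [pvRank_eq])
    simp [c0, c1, c2, c3, c4, c5, hA, pvLabels]
  · interval_cases h : (pvMinRank ts)
    · -- 0 : CASE or CITATION present
      have h0 : pvRank t = 0 := by omega
      rw [pvRank_eq] at h0
      split_ifs at h0 with e1 e2 <;> first
        | (subst e1; simp [htm, pvLabels])
        | (subst e2; simp [htm, pvLabels])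
    · -- 1 : PARTY present, nothing of rank 0
      have hp : t = "PARTY" := by
        have h0 : pvRank t = 1 := by omega
        rw [pvRank_eq] at h0; split_ifs at h0 <;> simp_all
      subst hp
      have c0 : "CASE" ∉ ts := pvNotMem (by simp [pvRank_eq]; omega)
      have c1 : "CITATION" ∉ ts := pvNotMem (by simp [pvRank_eq]; omega)
      simp [c0, c1, htm, pvLabels]
    · -- 2 : COURT or JUDGE present, nothing of rank < 2
      have c0 : "CASE" ∉ ts := pvNotMem (by simp [pvRank_eq]; omega)
      have c1 : "CITATION" ∉ ts := pvNotMem (by simp [pvRank_eq]; omega)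
      have c2 : "PARTY" ∉ ts := pvNotMem (by simp [pvRank_eq]; omega)
      have h0 : pvRank t = 2 := by omega
      rw [pvRank_eq] at h0
      split_ifs at h0 with e1 e2 e3 e4 e5 <;> first
        | (subst e4; simp [c0, c1, c2, htm, pvLabels])
        | (subst e5; simp [c0, c1, c2, htm, pvLabels])
        | omega
    · -- 3 : CONTRACT present, nothing of rank < 3
      have hp : t = "CONTRACT" := by
        have h0 : pvRank t = 3 := by omega
        rw [pvRank_eq] at h0; split_ifs at h0 <;> simp_all
      subst hp
      have c0 : "CASE" ∉ ts := pvNotMem (by simp [pvRank_eq]; omega)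
      have c1 : "CITATION" ∉ ts := pvNotMem (by simp [pvRank_eq]; omega)
      have c2 : "PARTY" ∉ ts := pvNotMem (by simp [pvRank_eq]; omega)
      have c3 : "COURT" ∉ ts := pvNotMem (by simp [pvRank_eq]; omega)
      have c4 : "JUDGE" ∉ ts := pvNotMem (by simp [pvRank_eq]; omega)
      simp [c0, c1, c2, c3, c4, htm, pvLabels]
    · -- 4 : nothing of rank < 4 present
      have c0 : "CASE" ∉ ts := pvNotMem (by simp [pvRank_eq]; omega)
      have c1 : "CITATION" ∉ ts := pvNotMem (by simp [pvRank_eq]; omega)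
      have c2 : "PARTY" ∉ ts := pvNotMem (by simp [pvRank_eq]; omega)
      have c3 : "COURT" ∉ ts := pvNotMem (by simp [pvRank_eq]; omega)
      have c4 : "JUDGE" ∉ ts := pvNotMem (by simp [pvRank_eq]; omega)
      have c5 : "CONTRACT" ∉ ts := pvNotMem (by simp [pvRank_eq]; omega)
      simp [c0, c1, c2, c3, c4, c5, pvLabels]

-- ===== VERDICT (by name: the statement is the Claim_ definition above) =====
theorem determine_link_type_py_spec : Claim_equal_determine_link_type_py := by
  intro shared all_e all_r _ _
  unfold Spec_determine_link_type_py determine_link_type_py determine_link_type_py_alt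
  have hdef : (fun (b : Nat) (t : String) => min b (pvRanks.getD t 4))
      = fun b t => min b (pvRank t) := rfl
  simp only [PySem.List.foldl_if_eq_foldl_filter, PySem.List.foldl_append_singleton_eq_map,
    List.nil_append]
  rw [← List.foldl_map (f := fun e => (PySem.Dict.mk e).getD "entity_type" "")
      (g := fun b t => min b (pvRanks.getD t 4)), hdef,
    pvFoldl_min _ 4 (by omega), Nat.min_eq_right (pvMinRank_le_four _)]
  exact pvClassify_eq _
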